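-- pv_equiv track=rewrite | github.com/tmammadov17503/Python_Projects | Python/DSA (Data Structures and Algorithms)/Week_3/Practice/n_odd_n_even_function.py | func
-- ===== SOURCE A (Python) =====
-- def count_ones_in_binary(n):
--     return bin(n).count('1')
--
-- def func(n, memo={}):
--     if n in memo:
--         return memo[n]
--     if n == 0:
--         return 0
--     if n % 2 == 1:
--         memo[n] = 2 * func(n // 2, memo) + (n // 2 + 1)
--     else:
--         memo[n] = func(n - 1, memo) + count_ones_in_binary(n)
--     return memo[n]
-- ===== SOURCE B (Python) =====
-- def func(n, memo={}):
--     # func(n) = total number of 1-bits among the binary representations of 0..n.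
--     # Count per bit position: among 0..n there are
--     # ((n+1) >> (i+1)) << i  full blocks plus a partial block of
--     # max(0, ((n+1) & ((1 << (i+1)) - 1)) - (1 << i)) numbers with bit i set.
--     total = 0
--     i = 0
--     while (1 << i) <= n:
--         block = 1 << (i + 1)
--         total += ((n + 1) // block) * (1 << i) + max(0, (n + 1) % block - (1 << i))
--         i += 1
--     return total
-- ===== Notes on version B (the rewrite author's own statement) =====
-- stated objective: alternative
-- what changed: Replaces the memoized odd/even recursive descent with a single non-recursive loop over bit positions that counts, per position, how many of 0..n have that bit set via a block-counting formula (no memo, no recursion).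
import Mathlib
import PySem

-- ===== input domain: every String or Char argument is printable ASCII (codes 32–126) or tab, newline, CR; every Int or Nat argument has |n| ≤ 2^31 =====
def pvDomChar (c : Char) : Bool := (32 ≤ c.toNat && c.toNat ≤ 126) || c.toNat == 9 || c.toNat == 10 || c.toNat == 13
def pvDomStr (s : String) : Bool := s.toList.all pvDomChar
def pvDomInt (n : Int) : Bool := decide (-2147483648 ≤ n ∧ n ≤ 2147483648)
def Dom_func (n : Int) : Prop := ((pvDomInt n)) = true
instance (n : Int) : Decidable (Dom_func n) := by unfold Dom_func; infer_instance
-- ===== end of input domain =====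

-- B replaces A's odd/even recursive descent (with memo) by a single loop over bit
-- positions, counting how many of 0..n have each bit set; equivalence is about the
-- return value only (A also mutates its shared default-argument memo dict).

-- ===== PORT A =====
-- Transliteration of A's recursion. The memo dict is pure caching (it only ever
-- stores the value the recursion would recompute), so it is omitted; the fuel
-- n.toNat + 1 is enough for every n ≥ 0 (each recursive call strictly decreases
-- the argument), and for n < 0 Python's A never terminates — excluded by Pre_.
-- bin(n).count('1') is PySem.Int.bitCount (Python-exact).
def goA : Nat → Int → Int
  | 0, _ => 0
  | f+1, n =>
    if n = 0 then 0
    else if PySem.Int.mod n 2 = 1 then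
      2 * goA f (PySem.Int.floordiv n 2) + (PySem.Int.floordiv n 2 + 1)
    else
      goA f (n - 1) + (PySem.Int.bitCount n : Int)

def func (n : Int) : Int := goA (n.toNat + 1) n

-- ===== PORT B =====
-- Transliteration of Source B: loop over bit positions i while (1 << i) <= n,
-- adding full-block and partial-block counts of integers in [0, n] with bit i set.
-- Fuel n.toNat + 1 bounds the number of iterations (2^i ≤ n forces i < n + 1).
def goB : Nat → Nat → Int → Int → Int
  | 0, _, _, total => total
  | f+1, i, n, total =>
    if (2:Int)^i ≤ n then
      goB f (i+1) n (total + PySem.Int.floordiv (n+1) (2^(i+1)) * 2^i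
        + max 0 (PySem.Int.mod (n+1) (2^(i+1)) - 2^i))
    else total

def func_alt (n : Int) : Int := goB (n.toNat + 1) 0 n 0

-- ===== PRECONDITION & SPEC =====
-- Pre_ excludes exactly n < 0, where Python's A recurses forever (RecursionError).
def Pre_func (n : Int) : Prop := 0 ≤ n
instance (n : Int) : Decidable (Pre_func n) := by unfold Pre_func; infer_instance
def pvWitness_func : Int := 6

def Spec_func (n : Int) (out : Int) : Prop := out = func_alt n
instance (n : Int) (out : Int) : Decidable (Spec_func n out) := by unfold Spec_func; infer_instance

-- ===== CLAIM (what is proved, stated in full; the proofs are below) =====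
def Claim_equal_func : Prop := ∀ (n : Int), Dom_func n → Pre_func n → Spec_func n (func n)

-- ===== LEMMAS AND PROOFS =====

-- popcount on Nat, and S n = total popcount over 0..n
def pcN : Nat → Nat
  | 0 => 0
  | n+1 => (n+1) % 2 + pcN ((n+1)/2)

def SN (n : Nat) : Nat := ∑ k ∈ Finset.range (n+1), pcN k

lemma pc_pos (m : Nat) (hm : 0 < m) : pcN m = m % 2 + pcN (m / 2) := by
  cases m with
  | zero => omega
  | succ k => rw [pcN]

lemma bitCount_eq_pcN (k : Nat) : (PySem.Int.bitCount (k : Int) : Int) = (pcN k : Int) := by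
  induction k using Nat.strong_induction_on with
  | _ k ih =>
    cases Nat.eq_zero_or_pos k with
    | inl h => subst h; simp [pcN, PySem.Int.bitCount_zero]
    | inr h =>
      rw [PySem.Int.bitCount_natCast h, pc_pos k h]
      have := ih (k / 2) (Nat.div_lt_self h (by omega))
      push_cast at this ⊢
      omega

lemma S_succ (n : Nat) : SN (n+1) = SN n + pcN (n+1) := Finset.sum_range_succ _ _

lemma pc_even (m : Nat) : pcN (2*m) = pcN m := by
  cases Nat.eq_zero_or_pos m with
  | inl h => subst h; rfl
  | inr h =>
    rw [pc_pos (2*m) (by omega)]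
    have h1 : 2*m % 2 = 0 := by omega
    have h2 : 2*m / 2 = m := by omega
    rw [h1, h2]; omega

lemma pc_odd (m : Nat) : pcN (2*m+1) = pcN m + 1 := by
  rw [pc_pos (2*m+1) (by omega)]
  have h1 : (2*m+1) % 2 = 1 := by omega
  have h2 : (2*m+1) / 2 = m := by omega
  rw [h1, h2]; omega

lemma S_odd (m : Nat) : SN (2*m+1) = 2 * SN m + (m+1) := by
  induction m with
  | zero => simp [SN, Finset.sum_range_succ, pcN]
  | succ m ih =>
    have h1 : SN (2*(m+1)+1) = SN (2*m+1) + pcN (2*m+2) + pcN (2*m+3) := by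
      rw [show 2*(m+1)+1 = (2*m+2)+1 from by ring, S_succ,
          show 2*m+2 = (2*m+1)+1 from by ring, S_succ]
    have h2 : pcN (2*m+2) = pcN (m+1) := by
      rw [show 2*m+2 = 2*(m+1) from by ring, pc_even]
    have h3 : pcN (2*m+3) = pcN (m+1) + 1 := by
      rw [show 2*m+3 = 2*(m+1)+1 from by ring, pc_odd]
    have h4 : SN (m+1) = SN m + pcN (m+1) := S_succ m
    omega

-- ===== A-side =====
lemma goA_eq : ∀ f (k : Nat), k < f → goA f (k : Int) = (SN k : Int) := by
  intro f
  induction f with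
  | zero => intro k hk; omega
  | succ f ih =>
    intro k hk
    by_cases h0 : k = 0
    · subst h0; simp [goA, SN, pcN]
    · have hk1 : 1 ≤ k := by omega
      rw [goA]
      rw [if_neg (by exact_mod_cast h0)]
      have hmod : PySem.Int.mod (k : Int) 2 = ((k % 2 : Nat) : Int) := by
        exact_mod_cast PySem.Int.mod_natCast k 2
      have hdiv : PySem.Int.floordiv (k : Int) 2 = ((k / 2 : Nat) : Int) := by
        exact_mod_cast PySem.Int.floordiv_natCast k 2
      have ih2 : goA f ((k/2 : Nat) : Int) = (SN (k/2) : Int) := ih (k/2) (by omega)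
      by_cases hodd : k % 2 = 1
      · rw [if_pos (by rw [hmod, hodd]; rfl), hdiv, ih2]
        have hk2 : k = 2*(k/2)+1 := by omega
        conv_rhs => rw [hk2]
        rw [S_odd]
        push_cast; ring
      · rw [if_neg (by rw [hmod]; intro hc; apply hodd; exact_mod_cast hc)]
        have hsub : (k : Int) - 1 = ((k - 1 : Nat) : Int) := by omega
        rw [hsub, ih (k-1) (by omega), bitCount_eq_pcN]
        have hk2 : k = (k-1)+1 := by omega
        conv_rhs => rw [hk2, show SN ((k-1)+1) = SN (k-1) + pcN ((k-1)+1) from S_succ _]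
        rw [← hk2]
        push_cast; ring

lemma func_eq_SN (n : Int) (hn : 0 ≤ n) : func n = (SN n.toNat : Int) := by
  have h : n = (n.toNat : Int) := by omega
  rw [func, h, Int.toNat_natCast]
  exact goA_eq (n.toNat + 1) n.toNat (by omega)

-- ===== B-side =====
-- cB i m = number of k < m with bit i set
def cB (i m : Nat) : Nat := (m / 2^(i+1)) * 2^i + (m % 2^(i+1) - 2^i)

lemma cB_succ (i m : Nat) : cB i (m+1) = cB i m + (m / 2^i) % 2 := by
  have he0 : 0 < 2^i := Nat.two_pow_pos i
  unfold cB
  have hdd : ∀ x : Nat, x / 2^(i+1) = x / 2^i / 2 := by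
    intro x; rw [pow_succ, Nat.div_div_eq_div_mul]
  have hmm : ∀ x : Nat, x % 2^(i+1) = x % 2^i + 2^i * (x / 2^i % 2) := by
    intro x; rw [pow_succ]; exact Nat.mod_mul
  rw [hdd, hdd, hmm, hmm]
  set e := 2^i with he
  set q := m / e with hq
  set r := m % e with hr
  have h1 : e * q + r = m := Nat.div_add_mod m e
  have h3 : r < e := Nat.mod_lt _ he0
  by_cases hcase : r + 1 = e
  · have hm1 : m + 1 = e * (q+1) := by rw [Nat.mul_add, Nat.mul_one]; omega
    have hq' : (m+1) / e = q + 1 := by rw [hm1, Nat.mul_div_cancel_left _ he0]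
    have hr' : (m+1) % e = 0 := by rw [hm1]; exact Nat.mul_mod_right _ _
    rw [hq', hr']
    rcases Nat.mod_two_eq_zero_or_one q with hp | hp
    · have e1 : (q+1) / 2 = q / 2 := by omega
      have e2 : (q+1) % 2 = 1 := by omega
      rw [e1, e2, hp]
      generalize q / 2 * e = X
      omega
    · have e1 : (q+1) / 2 = q / 2 + 1 := by omega
      have e2 : (q+1) % 2 = 0 := by omega
      rw [e1, e2, hp, add_mul]
      generalize q / 2 * e = X
      omega
  · have hm1 : m + 1 = e * q + (r + 1) := by omega
    have hq' : (m+1) / e = q := by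
      rw [hm1, Nat.mul_add_div he0, Nat.div_eq_of_lt (by omega)]
      omega
    have hr' : (m+1) % e = r + 1 := by
      rw [hm1, Nat.mul_add_mod, Nat.mod_eq_of_lt (by omega)]
    rw [hq', hr']
    rcases Nat.mod_two_eq_zero_or_one q with hp | hp <;>
      · rw [hp]
        generalize q / 2 * e = X
        omega

lemma cB_zero (i : Nat) : cB i 0 = 0 := by
  simp [cB, Nat.zero_div, Nat.zero_mod]

lemma pcbits : ∀ B m, m < 2^B → pcN m = ∑ j ∈ Finset.range B, (m / 2^j) % 2 := by
  intro B
  induction B with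
  | zero =>
    intro m hm
    interval_cases m
    simp [pcN]
  | succ B ih =>
    intro m hm
    by_cases h0 : m = 0
    · subst h0; simp [pcN]
    · rw [Finset.sum_range_succ']
      have hstep : ∀ j : Nat, m / 2^(j+1) = (m / 2) / 2^j := by
        intro j
        rw [pow_succ', Nat.div_div_eq_div_mul]
      have hrw : (∑ j ∈ Finset.range B, m / 2^(j+1) % 2)
          = ∑ j ∈ Finset.range B, (m / 2) / 2^j % 2 := by
        apply Finset.sum_congr rfl; intro j _; rw [hstep]
      have hlt : m / 2 < 2^B := by
        have : (2:Nat)^(B+1) = 2 * 2^B := by rw [pow_succ']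
        omega
      rw [hrw, ← ih (m/2) hlt, pc_pos m (by omega)]
      simp [pow_zero]
      omega

lemma total_eq (B : Nat) : ∀ m, m ≤ 2^B →
    ∑ j ∈ Finset.range B, cB j m = ∑ k ∈ Finset.range m, pcN k := by
  intro m
  induction m with
  | zero => intro _; simp [cB_zero]
  | succ m ih =>
    intro hm
    have h1 : ∑ j ∈ Finset.range B, cB j (m+1)
        = ∑ j ∈ Finset.range B, (cB j m + (m / 2^j) % 2) := by
      apply Finset.sum_congr rfl; intro j _; rw [cB_succ]
    rw [h1, Finset.sum_add_distrib, ih (by omega), Finset.sum_range_succ,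
        pcbits B m (by omega)]

lemma goB_eq (N : Nat) : ∀ f i total, Nat.size N - i ≤ f →
    goB f i (N : Int) total = total + ∑ j ∈ Finset.Ico i (Nat.size N), (cB j (N+1) : Int) := by
  intro f
  induction f with
  | zero =>
    intro i total h
    rw [goB, Finset.Ico_eq_empty (by omega), Finset.sum_empty, add_zero]
  | succ f ih =>
    intro i total h
    rw [goB]
    by_cases hi : i < Nat.size N
    · have hcond : (2:Int)^i ≤ (N : Int) := by
        have := Nat.lt_size.mp hi
        exact_mod_cast this
      rw [if_pos hcond]
      have hfd : PySem.Int.floordiv ((N:Int)+1) (2^(i+1)) = (((N+1) / 2^(i+1) : Nat) : Int) := by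
        have := PySem.Int.floordiv_natCast (N+1) (2^(i+1))
        push_cast at this ⊢
        exact this
      have hfm : PySem.Int.mod ((N:Int)+1) (2^(i+1)) = (((N+1) % 2^(i+1) : Nat) : Int) := by
        have := PySem.Int.mod_natCast (N+1) (2^(i+1))
        push_cast at this ⊢
        exact this
      have hmax : max 0 ((((N+1) % 2^(i+1) : Nat) : Int) - 2^i) = (((N+1) % 2^(i+1) - 2^i : Nat) : Int) := by
        have h2 : ((2^i : Nat) : Int) = (2:Int)^i := by push_cast; ring
        omega
      rw [hfd, hfm, hmax, ih (i+1) _ (by omega),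
          Finset.sum_eq_sum_Ico_succ_bot hi (fun j => ((cB j (N+1) : Nat) : Int))]
      unfold cB
      push_cast
      ring
    · rw [if_neg (by intro hc; apply hi; exact Nat.lt_size.mpr (by exact_mod_cast hc)),
          Finset.Ico_eq_empty (by omega), Finset.sum_empty, add_zero]

lemma func_alt_eq_SN (n : Int) (hn : 0 ≤ n) : func_alt n = (SN n.toNat : Int) := by
  set N := n.toNat with hN
  have h : n = (N : Int) := by omega
  rw [func_alt, h, Int.toNat_natCast]
  have hfuel : Nat.size N - 0 ≤ N + 1 := by
    have : N < 2^(N+1) := lt_of_lt_of_le (Nat.lt_two_pow_self) (Nat.pow_le_pow_right (by omega) (by omega))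
    have := Nat.size_le.mpr this
    omega
  rw [goB_eq N (N+1) 0 0 hfuel, zero_add, ← Finset.range_eq_Ico]
  have hNle : N + 1 ≤ 2^(Nat.size N) := Nat.lt_size_self N
  rw [show (∑ j ∈ Finset.range (Nat.size N), ((cB j (N+1) : Nat) : Int))
        = ((∑ j ∈ Finset.range (Nat.size N), cB j (N+1) : Nat) : Int) from by push_cast; rfl,
      total_eq (Nat.size N) (N+1) hNle]
  rfl

-- ===== VERDICT (by name: the statement is the Claim_ definition above) =====
theorem func_spec : Claim_equal_func := by
  intro n _ hpre
  unfold Spec_func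
  rw [func_eq_SN n hpre, func_alt_eq_SN n hpre]
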